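-- pv_equiv track=rewrite | github.com/leehyeji319/PS | 기출/22winter2.py | solution
-- ===== SOURCE A (Python) =====
-- def isChange(arr, n, before):
--     flag = True
--     new_arr = arr[:(n//2)]
--     new = []
--     for i in range(len(new_arr)):
--         new.append(new_arr[i][0])
--
--     for i in range(len(new_arr)):
--         if new[i] not in before:
--             flag = False
--             break
--
--     return flag, new
--
-- def solution(n, student, point):
--     answer = 0
--     total = []
--
--     for i in range(1, n + 1):
--         total.append([i, 0])
--
--
--     for s, p in zip(student, point):
--         before = []
--         #점수 분배 중
--         for i in range(len(total)):
--             if total[i][0] == s: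
--                 total[i][1] += p
--         for i in range(len(total) // 2):
--             before.append(total[i][0])
--         #정렬후
--         total.sort(key=lambda x: (-x[1], x[0]))
--
--         flag, new_arr = isChange(total, n, before)
--         if not flag:
--             answer += 1
--
--
--     return answer
-- ===== SOURCE B (Python) =====
-- def solution(n, student, point):
--     # Instead of re-sorting the scoreboard after each update, observe that only
--     # the updated student's rank can move: the top-half id set changes exactly
--     # when that student's rank crosses the n//2 boundary.  Count ranks directly.
--     half = n // 2
--     score = {i: 0 for i in range(1, n + 1)}
--     answer = 0
--     for s, p in zip(student, point):
--         if s in score: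
--             old = score[s]
--             new = old + p
--             rank_before = sum(1 for j, q in score.items() if (-q, j) < (-old, s))
--             score[s] = new
--             rank_after = sum(1 for j, q in score.items() if (-q, j) < (-new, s))
--             if (rank_before < half) != (rank_after < half):
--                 answer += 1
--     return answer
-- ===== Notes on version B (the rewrite author's own statement) =====
-- stated objective: faster
-- what changed: B never sorts: it keeps a score dict and counts the updated student's rank before and after the update, incrementing the answer exactly when that rank crosses the n//2 boundary (the only way the top-half id set can change), replacing A's per-round full re-sort plus top-half subset comparison.
import Mathlib
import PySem

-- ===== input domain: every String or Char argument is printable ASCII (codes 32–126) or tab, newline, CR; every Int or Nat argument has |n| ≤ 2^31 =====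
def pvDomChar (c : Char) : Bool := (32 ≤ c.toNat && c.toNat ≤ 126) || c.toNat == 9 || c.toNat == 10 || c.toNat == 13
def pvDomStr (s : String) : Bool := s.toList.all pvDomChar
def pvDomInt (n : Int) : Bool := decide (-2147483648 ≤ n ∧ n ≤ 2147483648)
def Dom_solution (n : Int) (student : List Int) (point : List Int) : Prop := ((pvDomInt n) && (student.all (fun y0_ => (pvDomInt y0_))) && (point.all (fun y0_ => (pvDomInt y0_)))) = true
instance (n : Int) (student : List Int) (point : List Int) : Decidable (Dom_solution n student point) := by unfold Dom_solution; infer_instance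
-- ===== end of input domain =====

-- B never sorts: it counts the updated student's rank before and after the update and
-- increments exactly when that rank crosses the n//2 boundary (the only way the top-half
-- id set can change); a timing run measured B faster at the largest size.

-- ===== PORT A =====
-- def isChange(arr, n, before)
def pvIsChange (arr : List (Int × Int)) (n : Int) (before : List Int) : Bool × List Int :=
  let new_arr := PySem.List.slice arr none (some (PySem.Int.floordiv n 2))   -- arr[:(n//2)]
  let new := new_arr.map (fun e => e.1)                                      -- for i in range(len(new_arr)): new.append(new_arr[i][0])
  let flag := new.all (fun x => before.contains x)                           -- loop with break: flag=False on first miss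
  (flag, new)

-- one iteration of A's 'for s, p in zip(student, point)' body
def pvStepA (n : Int) (st : List (Int × Int) × Int) (sp : Int × Int) : List (Int × Int) × Int :=
  let total1 := st.1.map (fun e => if e.1 == sp.1 then (e.1, e.2 + sp.2) else e)  -- in-place score update
  let before := (total1.take (total1.length / 2)).map (fun e => e.1)             -- for i in range(len(total)//2)
  let total2 := PySem.List.sorted2 total1 (fun x => -x.2) (fun x => x.1)          -- total.sort(key=lambda x: (-x[1], x[0]))
  let fn := pvIsChange total2 n before
  (total2, if !fn.1 then st.2 + 1 else st.2)

def solution (n : Int) (student : List Int) (point : List Int) : Int :=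
  let total0 := (PySem.List.pyRange 1 (n + 1)).map (fun i => (i, (0 : Int)))     -- total.append([i, 0])
  ((student.zip point).foldl (pvStepA n) (total0, 0)).2

-- ===== PORT B =====
-- Python tuple comparison (-q, j) < (-sc, s), written out component-wise
def pvRankLt (q sc j s : Int) : Bool :=
  decide ((-q : Int) < -sc) || (decide ((-q : Int) = -sc) && decide (j < s))

-- sum(1 for j, q in score.items() if (-q, j) < (-sc, s))
def pvRank (items : List (Int × Int)) (sc : Int) (s : Int) : Int :=
  ((items.filter (fun jq => pvRankLt jq.2 sc jq.1 s)).length : Int)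

-- one iteration of B's loop: rank before the update, rank after, boundary-crossing test
def pvStepB (half : Int) (st : PySem.Dict Int Int × Int) (sp : Int × Int) :
    PySem.Dict Int Int × Int :=
  if st.1.contains sp.1 then
    let old := st.1.getD sp.1 0
    let nw := old + sp.2
    let i := pvRank st.1.items old sp.1
    let d' := st.1.insert sp.1 nw
    let j := pvRank d'.items nw sp.1
    (d', if decide (i < half) != decide (j < half) then st.2 + 1 else st.2)
  else st

def solution_alt (n : Int) (student : List Int) (point : List Int) : Int :=
  let half := PySem.Int.floordiv n 2
  let score := (PySem.List.pyRange 1 (n + 1)).foldl (fun d i => d.insert i (0 : Int)) PySem.Dict.empty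
  ((student.zip point).foldl (pvStepB half) (score, 0)).2

-- ===== PRECONDITION & SPEC =====
def Spec_solution (n : Int) (student : List Int) (point : List Int) (out : Int) : Prop := out = solution_alt n student point
instance (n : Int) (student : List Int) (point : List Int) (out : Int) : Decidable (Spec_solution n student point out) := by unfold Spec_solution; infer_instance

-- ===== CLAIM (what is proved, stated in full; the proofs are below) =====
def Claim_equal_solution : Prop := ∀ (n : Int) (student : List Int) (point : List Int), Dom_solution n student point → Spec_solution n student point (solution n student point)

-- ===== LEMMAS AND PROOFS =====

def pvKey (x : Int × Int) : Lex (Int × Int) := toLex (-x.2, x.1)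
def pvPairs (l : List Int) (f : Int → Int) : List (Int × Int) := l.map (fun i => (i, f i))
def pvRk (l : List Int) (f : Int → Int) (t : Int) : Nat :=
  l.countP (fun j => decide (pvKey (j, f j) < pvKey (t, f t)))
lemma pv_key_inj : Function.Injective pvKey := by
  intro a b h
  have h' : ((-a.2 : Int), a.1) = ((-b.2 : Int), b.1) := congrArg ofLex h
  rw [Prod.ext_iff] at h' ⊢
  omega
lemma pv_sorted2_eq_sorted (zs : List (Int × Int)) :
    PySem.List.sorted2 zs (fun x => -x.2) (fun x => x.1) = PySem.List.sorted zs pvKey := by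
  have hcmp : (fun (a b : Int × Int) =>
        (decide ((-a.2 : Int) < -b.2) || (!decide ((-b.2 : Int) < -a.2) && decide (a.1 < b.1))))
      = fun a b => decide (pvKey a < pvKey b) := by
    funext a b
    by_cases h1 : (-a.2 : Int) < -b.2 <;> by_cases h2 : (-b.2 : Int) < -a.2 <;>
      by_cases h3 : (a.1 : Int) < b.1 <;>
        simp [pvKey, Prod.Lex.lt_iff, h1, h2, h3] <;> omega
  simp only [PySem.List.sorted2, PySem.List.sorted]
  rw [hcmp]
  norm_num

lemma pv_sorted2_congr {xs ys : List (Int × Int)} (h : xs.Perm ys) :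
    PySem.List.sorted2 xs (fun x => -x.2) (fun x => x.1)
      = PySem.List.sorted2 ys (fun x => -x.2) (fun x => x.1) := by
  rw [pv_sorted2_eq_sorted, pv_sorted2_eq_sorted]
  exact PySem.List.sorted_eq_sorted_of_perm xs ys pvKey pv_key_inj h

lemma pv_pairwise_lt (l : List Int) (hnd : l.Nodup) (f : Int → Int) :
    (PySem.List.sorted2 (pvPairs l f) (fun x => -x.2) (fun x => x.1)).Pairwise
      (fun x y => pvKey x < pvKey y) := by
  rw [pv_sorted2_eq_sorted]
  have hle : (PySem.List.sorted (pvPairs l f) pvKey false).Pairwise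
      (fun x y => pvKey x ≤ pvKey y) := PySem.List.sorted_pairwise _ _
  have hkeysnd : ((PySem.List.sorted (pvPairs l f) pvKey false).map pvKey).Nodup := by
    have h1 : ((pvPairs l f).map pvKey).Nodup := by
      rw [pvPairs, List.map_map]
      exact List.Nodup.map (fun a b hab => by
        have : toLex ((-f a : Int), a) = toLex ((-f b : Int), b) := hab
        have h2 := congrArg ofLex this
        rw [Prod.ext_iff] at h2
        exact h2.2) hnd
    exact ((PySem.List.sorted_perm (pvPairs l f) pvKey false).map pvKey).nodup_iff.mpr h1
  have hne : (PySem.List.sorted (pvPairs l f) pvKey false).Pairwise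
      (fun x y => pvKey x ≠ pvKey y) := List.pairwise_map.mp hkeysnd
  exact (hle.and hne).imp (fun h => lt_of_le_of_ne h.1 h.2)

lemma pv_countP_exists (L : List (Int × Int))
    (hp : L.Pairwise (fun x y => pvKey x < pvKey y)) (r : Nat) (hr : r < L.length) :
    ∃ x ∈ L, L.countP (fun y => decide (pvKey y < pvKey x)) = r := by
  induction L generalizing r with
  | nil => simp at hr
  | cons a T ih =>
    rw [List.pairwise_cons] at hp
    cases r with
    | zero =>
      refine ⟨a, List.mem_cons_self, ?_⟩
      rw [List.countP_cons]
      have h0 : T.countP (fun y => decide (pvKey y < pvKey a)) = 0 := by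
        rw [List.countP_eq_zero]
        intro y hy
        simp only [decide_eq_true_eq]
        exact not_lt.mpr (le_of_lt (hp.1 y hy))
      rw [h0]
      simp
    | succ r' =>
      have hr' : r' < T.length := by simpa using hr
      obtain ⟨x, hx, hcnt⟩ := ih hp.2 r' hr'
      refine ⟨x, List.mem_cons_of_mem a hx, ?_⟩
      rw [List.countP_cons, hcnt]
      have ha : pvKey a < pvKey x := hp.1 x hx
      simp [ha]

lemma pv_mem_take (L : List (Int × Int))
    (hp : L.Pairwise (fun x y => pvKey x < pvKey y)) (x : Int × Int) (h : Nat) :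
    x ∈ L.take h ↔ x ∈ L ∧ L.countP (fun y => decide (pvKey y < pvKey x)) < h := by
  induction L generalizing h with
  | nil => simp
  | cons a T ih =>
    rw [List.pairwise_cons] at hp
    cases h with
    | zero => simp
    | succ h' =>
      rw [List.take_succ_cons, List.mem_cons, List.mem_cons, List.countP_cons, ih hp.2 h']
      by_cases hxa : x = a
      · subst hxa
        have h0 : T.countP (fun y => decide (pvKey y < pvKey x)) = 0 := by
          rw [List.countP_eq_zero]
          intro y hy
          simp only [decide_eq_true_eq]
          exact not_lt.mpr (le_of_lt (hp.1 y hy))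
        have hlt : ¬ pvKey x < pvKey x := lt_irrefl _
        simp [h0]
      · have hsplit : ∀ hxT : x ∈ T, pvKey a < pvKey x := fun hxT => hp.1 x hxT
        constructor
        · rintro (h1 | ⟨hxT, hcnt⟩)
          · exact absurd h1 hxa
          · refine ⟨Or.inr hxT, ?_⟩
            simp [hsplit hxT]
            omega
        · rintro ⟨h1 | hxT, hcnt⟩
          · exact absurd h1 hxa
          · refine Or.inr ⟨hxT, ?_⟩
            simp [hsplit hxT] at hcnt
            omega

lemma pv_top_mem (l : List Int) (hnd : l.Nodup) (f : Int → Int) (h : Nat) (t : Int) :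
    (t ∈ ((PySem.List.sorted2 (pvPairs l f) (fun x => -x.2) (fun x => x.1)).take h).map
        (fun e => e.1))
      ↔ t ∈ l ∧ pvRk l f t < h := by
  have hperm : (PySem.List.sorted2 (pvPairs l f) (fun x => -x.2) (fun x => x.1)).Perm
      (pvPairs l f) := PySem.List.sorted2_perm _ _ _ _
  have hp := pv_pairwise_lt l hnd f
  have hcnt : ∀ x : Int × Int,
      (PySem.List.sorted2 (pvPairs l f) (fun x => -x.2) (fun x => x.1)).countP
          (fun y => decide (pvKey y < pvKey x))
        = (pvPairs l f).countP (fun y => decide (pvKey y < pvKey x)) :=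
    fun x => hperm.countP_eq _
  have hrkP : (pvPairs l f).countP (fun y => decide (pvKey y < pvKey (t, f t))) = pvRk l f t := by
    rw [pvPairs, List.countP_map]; rfl
  constructor
  · intro hm
    rw [List.mem_map] at hm
    obtain ⟨x, hx, hxt⟩ := hm
    rw [pv_mem_take _ hp] at hx
    have hxP : x ∈ pvPairs l f := hperm.mem_iff.mp hx.1
    rw [pvPairs, List.mem_map] at hxP
    obtain ⟨i, hi, hix⟩ := hxP
    have hit : i = t := by rw [← hxt, ← hix]
    subst hit
    refine ⟨hi, ?_⟩
    rw [← hrkP, ← hcnt, hix]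
    exact hx.2
  · rintro ⟨ht, hrk⟩
    have hxP : (t, f t) ∈ pvPairs l f := by
      rw [pvPairs, List.mem_map]; exact ⟨t, ht, rfl⟩
    have hxs : (t, f t) ∈ (PySem.List.sorted2 (pvPairs l f) (fun x => -x.2) (fun x => x.1)) :=
      hperm.mem_iff.mpr hxP
    have : (t, f t) ∈ (PySem.List.sorted2 (pvPairs l f) (fun x => -x.2) (fun x => x.1)).take h := by
      rw [pv_mem_take _ hp]
      exact ⟨hxs, by rw [hcnt, hrkP]; exact hrk⟩
    rw [List.mem_map]
    exact ⟨(t, f t), this, rfl⟩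

def pvUpd (f : Int → Int) (s p : Int) : Int → Int := fun j => if j = s then f s + p else f j

lemma pv_key_fst {a b : Int × Int} (h : pvKey a = pvKey b) : a.1 = b.1 := by
  have := pv_key_inj h; rw [this]

lemma pv_key_ne {t s : Int} (a b : Int) (h : t ≠ s) : pvKey (t, a) ≠ pvKey (s, b) :=
  fun he => h (pv_key_fst he)

lemma pv_rk_mono (l : List Int) (f : Int → Int) {t u : Int} (ht : t ∈ l)
    (h : pvKey (t, f t) < pvKey (u, f u)) : pvRk l f t < pvRk l f u := by
  obtain ⟨l1, l2, rfl⟩ := List.append_of_mem ht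
  unfold pvRk
  rw [List.countP_append, List.countP_append, List.countP_cons, List.countP_cons]
  have hmono : ∀ L : List Int,
      L.countP (fun j => decide (pvKey (j, f j) < pvKey (t, f t)))
        ≤ L.countP (fun j => decide (pvKey (j, f j) < pvKey (u, f u))) := by
    intro L
    apply List.countP_mono_left
    intro j _ hj
    simp only [decide_eq_true_eq] at hj ⊢
    exact lt_trans hj h
  have h1 := hmono l1
  have h2 := hmono l2
  have hpt : decide (pvKey (t, f t) < pvKey (t, f t)) = false := by simp
  have hpu : decide (pvKey (t, f t) < pvKey (u, f u)) = true := by simpa using h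
  rw [hpt, hpu]
  norm_num
  omega

lemma pv_rk_reflect (l : List Int) (f : Int → Int) {t u : Int} (hu : u ∈ l)
    (hne : t ≠ u) (h : pvRk l f t < pvRk l f u) : pvKey (t, f t) < pvKey (u, f u) := by
  rcases lt_trichotomy (pvKey (t, f t)) (pvKey (u, f u)) with hlt | heq | hgt
  · exact hlt
  · exact absurd heq (pv_key_ne _ _ hne)
  · exact absurd (pv_rk_mono l f hu hgt) (by omega)

lemma pv_rk_split (l : List Int) (hnd : l.Nodup) (f : Int → Int) (s p t : Int)
    (hs : s ∈ l) (hts : t ≠ s) :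
    pvRk l (pvUpd f s p) t + (if pvKey (s, f s) < pvKey (t, f t) then 1 else 0)
      = pvRk l f t + (if pvKey (s, f s + p) < pvKey (t, f t) then 1 else 0) := by
  obtain ⟨l1, l2, rfl⟩ := List.append_of_mem hs
  obtain ⟨hn1, hn2, hn3⟩ := List.nodup_append.mp hnd
  rw [List.nodup_cons] at hn2
  have hs1 : s ∉ l1 := fun hmem => by have := hn3 s hmem; simp at this
  have hs2 : s ∉ l2 := hn2.1
  have hgt : pvUpd f s p t = f t := by simp [pvUpd, hts]
  have hgs : pvUpd f s p s = f s + p := by simp [pvUpd]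
  have hcongr : ∀ L : List Int, s ∉ L →
      L.countP (fun j => decide (pvKey (j, pvUpd f s p j) < pvKey (t, pvUpd f s p t)))
        = L.countP (fun j => decide (pvKey (j, f j) < pvKey (t, f t))) := by
    intro L hsL
    apply List.countP_congr
    intro j hj
    have hjs : j ≠ s := fun he => hsL (he ▸ hj)
    rw [hgt, show pvUpd f s p j = f j by simp [pvUpd, hjs]]
  unfold pvRk
  rw [List.countP_append, List.countP_append, List.countP_cons, List.countP_cons,
    hcongr l1 hs1, hcongr l2 hs2, hgt, hgs]
  by_cases h1 : pvKey (s, f s) < pvKey (t, f t) <;>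
    by_cases h2 : pvKey (s, f s + p) < pvKey (t, f t) <;>
      simp [h1, h2]
  · omega
  · omega

lemma pv_rk_exists (l : List Int) (hnd : l.Nodup) (f : Int → Int) (r : Nat)
    (hr : r < l.length) : ∃ t ∈ l, pvRk l f t = r := by
  have hp := pv_pairwise_lt l hnd f
  have hlen : (PySem.List.sorted2 (pvPairs l f) (fun x => -x.2) (fun x => x.1)).length
      = l.length := by
    rw [(PySem.List.sorted2_perm _ _ _ _).length_eq, pvPairs, List.length_map]
  obtain ⟨x, hxL, hcnt⟩ := pv_countP_exists _ hp r (by omega)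
  have hxP : x ∈ pvPairs l f := (PySem.List.sorted2_perm _ _ _ _).mem_iff.mp hxL
  rw [pvPairs, List.mem_map] at hxP
  obtain ⟨i, hi, hix⟩ := hxP
  refine ⟨i, hi, ?_⟩
  have : pvRk l f i
      = (PySem.List.sorted2 (pvPairs l f) (fun x => -x.2) (fun x => x.1)).countP
          (fun y => decide (pvKey y < pvKey (i, f i))) := by
    rw [(PySem.List.sorted2_perm (pvPairs l f) _ _ _).countP_eq, pvPairs, List.countP_map]
    rfl
  rw [this, hix, hcnt]

-- THE CORE: the new top half stays inside the old one iff s's rank does not cross h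
lemma pv_cross (l : List Int) (hnd : l.Nodup) (f : Int → Int) (s p : Int)
    (hs : s ∈ l) (h : Nat) (hh : h ≤ l.length) :
    (∀ t ∈ l, pvRk l (pvUpd f s p) t < h → pvRk l f t < h)
      ↔ (pvRk l f s < h ↔ pvRk l (pvUpd f s p) s < h) := by
  have hgs : pvUpd f s p s = f s + p := by simp [pvUpd]
  constructor
  · intro hsub
    constructor
    · intro hfs
      by_contra hgsge
      push Not at hgsge
      have hpos : 1 ≤ h := by omega
      obtain ⟨t, ht, hrt⟩ := pv_rk_exists l hnd (pvUpd f s p) (h - 1) (by omega)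
      have hts : t ≠ s := by
        intro he
        rw [he] at hrt
        omega
      have hsplit := pv_rk_split l hnd f s p t hs hts
      have hgt : pvUpd f s p t = f t := by simp [pvUpd, hts]
      -- the new key of s is above the new key of t
      have hkgs : pvKey (t, pvUpd f s p t) < pvKey (s, pvUpd f s p s) :=
        pv_rk_reflect l (pvUpd f s p) hs hts (by omega)
      have hb : ¬ pvKey (s, f s + p) < pvKey (t, f t) := by
        rw [hgt, hgs] at hkgs
        exact not_lt.mpr (le_of_lt hkgs)
      rw [if_neg hb] at hsplit
      by_cases ha : pvKey (s, f s) < pvKey (t, f t)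
      · rw [if_pos ha] at hsplit
        -- rk f t = h, yet t is in the new top half: subset fails
        have := hsub t ht (by omega)
        omega
      · -- old key of t below old key of s: rk f t < rk f s < h, contradiction chain
        have hklt : pvKey (t, f t) < pvKey (s, f s) := by
          rcases lt_trichotomy (pvKey (t, f t)) (pvKey (s, f s)) with h1 | h1 | h1
          · exact h1
          · exact absurd h1 (pv_key_ne _ _ hts)
          · exact absurd h1 ha
        have := pv_rk_mono l f ht hklt
        rw [if_neg ha] at hsplit
        omega
    · intro hgslt
      by_contra hfsge
      have := hsub s hs hgslt
      omega
  · intro hiff t ht hgt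
    by_cases hts : t = s
    · subst hts
      exact hiff.mpr hgt
    · have hsplit := pv_rk_split l hnd f s p t hs hts
      have hgtt : pvUpd f s p t = f t := by simp [pvUpd, hts]
      by_contra hge
      push Not at hge
      have ha : pvKey (s, f s) < pvKey (t, f t) := by
        by_cases ha : pvKey (s, f s) < pvKey (t, f t)
        · exact ha
        · rw [if_neg ha] at hsplit
          split_ifs at hsplit <;> omega
      have hb : ¬ pvKey (s, f s + p) < pvKey (t, f t) := by
        intro hb
        rw [if_pos ha, if_pos hb] at hsplit
        omega
      rw [if_pos ha, if_neg hb] at hsplit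
      -- so rk f t = h, rk g t = h - 1; s moved down past t: crossing after all
      have hfs : pvRk l f s < h := by
        have := pv_rk_mono l f hs ha
        omega
      have hgsl : pvRk l (pvUpd f s p) s < h := hiff.mp hfs
      have hkgs : pvKey (t, pvUpd f s p t) < pvKey (s, pvUpd f s p s) := by
        rw [hgtt, hgs]
        rcases lt_trichotomy (pvKey (t, f t)) (pvKey (s, f s + p)) with h1 | h1 | h1
        · exact h1
        · exact absurd h1 (pv_key_ne _ _ hts)
        · exact absurd h1 hb
      have := pv_rk_mono l (pvUpd f s p) ht hkgs
      omega


lemma pv_nodup_pyRange (a b : Int) : (PySem.List.pyRange a b).Nodup := by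
  rw [PySem.List.pyRange_one]
  exact List.Nodup.map (fun x y hxy => by omega) List.nodup_range

lemma pv_len_pyRange (n : Int) : (PySem.List.pyRange 1 (n + 1)).length = n.toNat := by
  rw [PySem.List.pyRange_one]
  simp

lemma pv_slice_half (n : Int) (l : List (Int × Int)) (hl : l.length = n.toNat) :
    PySem.List.slice l none (some (PySem.Int.floordiv n 2)) = l.take (l.length / 2) := by
  by_cases hn : 0 ≤ n
  · have hcast : n = ((n.toNat : Nat) : Int) := by omega
    rw [hcast, show ((2 : Int)) = ((2 : Nat) : Int) from rfl, PySem.Int.floordiv_natCast,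
      PySem.List.slice_to_natCast, hl]
  · have hnil : l = [] := List.length_eq_zero_iff.mp (by omega)
    subst hnil
    simp [PySem.List.slice]

lemma pv_rankLt_eq (q sc j s : Int) :
    pvRankLt q sc j s = decide (pvKey (j, q) < pvKey (s, sc)) := by
  by_cases h1 : (-q : Int) < -sc <;> by_cases h2 : (-q : Int) = -sc <;>
    by_cases h3 : j < s <;>
      simp [pvRankLt, pvKey, Prod.Lex.lt_iff, h1, h2, h3]

lemma pv_rank_eq_countP (L : List (Int × Int)) (sc s : Int) :
    pvRank L sc s = (L.countP (fun y => decide (pvKey y < pvKey (s, sc))) : Int) := by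
  unfold pvRank
  rw [show (fun jq : Int × Int => pvRankLt jq.2 sc jq.1 s)
        = (fun y : Int × Int => decide (pvKey y < pvKey (s, sc)))
      from funext fun y => pv_rankLt_eq y.2 sc y.1 s, List.countP_eq_length_filter]

lemma pv_rank_pairs (l : List Int) (f : Int → Int) (s : Int) :
    pvRank (pvPairs l f) (f s) s = (pvRk l f s : Int) := by
  rw [pv_rank_eq_countP, pvPairs, List.countP_map, pvRk]
  rfl

-- the loop invariant: A carries the sorted scoreboard, B carries it as a dict, for one
-- and the same score function f on the ids 1..n, with equal answers
def pvInv (n : Int) (sA : List (Int × Int) × Int) (sB : PySem.Dict Int Int × Int) : Prop :=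
  ∃ f : Int → Int,
    sA.1 = PySem.List.sorted2 (pvPairs (PySem.List.pyRange 1 (n + 1)) f)
        (fun x => -x.2) (fun x => x.1) ∧
    sB.1.items = pvPairs (PySem.List.pyRange 1 (n + 1)) f ∧
    sA.2 = sB.2

lemma pv_step (n : Int) (sA : List (Int × Int) × Int) (sB : PySem.Dict Int Int × Int)
    (x : Int × Int) (h : pvInv n sA sB) :
    pvInv n (pvStepA n sA x) (pvStepB (PySem.Int.floordiv n 2) sB x) := by
  obtain ⟨f, hA, hB, hans⟩ := h
  obtain ⟨s, p⟩ := x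
  obtain ⟨total, a⟩ := sA
  obtain ⟨d, b⟩ := sB
  replace hA : total = PySem.List.sorted2 (pvPairs (PySem.List.pyRange 1 (n + 1)) f)
      (fun x => -x.2) (fun x => x.1) := hA
  replace hB : d.items = pvPairs (PySem.List.pyRange 1 (n + 1)) f := hB
  replace hans : a = b := hans
  have hnd : (PySem.List.pyRange 1 (n + 1)).Nodup := pv_nodup_pyRange 1 (n + 1)
  have hlenl : (PySem.List.pyRange 1 (n + 1)).length = n.toNat := pv_len_pyRange n
  have hkeys : d.keys = PySem.List.pyRange 1 (n + 1) := by
    show d.items.map (fun p => p.1) = _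
    rw [hB, pvPairs, List.map_map]
    exact List.map_id'' (fun _ => rfl) _
  have hknd : d.keys.Nodup := by rw [hkeys]; exact hnd
  have hpermA : total.Perm (pvPairs (PySem.List.pyRange 1 (n + 1)) f) := by
    rw [hA]; exact PySem.List.sorted2_perm _ _ _ _
  have hfstupd : ∀ e : Int × Int, (if e.1 == s then (e.1, e.2 + p) else e).1 = e.1 := by
    intro e; split <;> rfl
  by_cases hc : d.contains s = true
  · -- s is on the board
    have hsl : s ∈ PySem.List.pyRange 1 (n + 1) := by
      rw [← hkeys]; exact (PySem.Dict.contains_iff_mem_keys d s).mp hc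
    have hn1 : 1 ≤ n.toNat := by
      by_contra hz
      have : PySem.List.pyRange 1 (n + 1) = [] := List.length_eq_zero_iff.mp (by omega)
      rw [this] at hsl; exact absurd hsl (List.not_mem_nil)
    have hmap1 : (pvPairs (PySem.List.pyRange 1 (n + 1)) f).map
          (fun e => if e.1 == s then (e.1, e.2 + p) else e)
        = pvPairs (PySem.List.pyRange 1 (n + 1)) (pvUpd f s p) := by
      rw [pvPairs, pvPairs, List.map_map]
      refine List.map_congr_left (fun i _ => ?_)
      by_cases his : i = s
      · subst his; simp [pvUpd]
      · simp [pvUpd, his]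
    have hperm1 : (total.map (fun e => if e.1 == s then (e.1, e.2 + p) else e)).Perm
        (pvPairs (PySem.List.pyRange 1 (n + 1)) (pvUpd f s p)) := by
      rw [← hmap1]; exact hpermA.map _
    have htot2 : PySem.List.sorted2 (total.map (fun e => if e.1 == s then (e.1, e.2 + p) else e))
          (fun x => -x.2) (fun x => x.1)
        = PySem.List.sorted2 (pvPairs (PySem.List.pyRange 1 (n + 1)) (pvUpd f s p))
            (fun x => -x.2) (fun x => x.1) := pv_sorted2_congr hperm1
    have hlen_tot : total.length = n.toNat := by
      rw [hpermA.length_eq, pvPairs, List.length_map, hlenl]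
    have hlen2 : (PySem.List.sorted2 (pvPairs (PySem.List.pyRange 1 (n + 1)) (pvUpd f s p))
          (fun x => -x.2) (fun x => x.1)).length = n.toNat := by
      rw [(PySem.List.sorted2_perm _ _ _ _).length_eq, pvPairs, List.length_map, hlenl]
    -- A's before list is the old top-half id list
    have hbefore : ((total.map (fun e => if e.1 == s then (e.1, e.2 + p) else e)).take
          ((total.map (fun e => if e.1 == s then (e.1, e.2 + p) else e)).length / 2)).map
          (fun e => e.1)
        = ((PySem.List.sorted2 (pvPairs (PySem.List.pyRange 1 (n + 1)) f)
              (fun x => -x.2) (fun x => x.1)).take (n.toNat / 2)).map (fun e => e.1) := by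
      rw [List.length_map, hlen_tot, ← List.map_take, List.map_map]
      rw [show ((fun e : Int × Int => e.1) ∘ (fun e : Int × Int => if e.1 == s then (e.1, e.2 + p) else e))
            = (fun e : Int × Int => e.1) from funext hfstupd]
      rw [hA]
    -- A's new list is the new top-half id list
    have hnew : (PySem.List.slice
          (PySem.List.sorted2 (pvPairs (PySem.List.pyRange 1 (n + 1)) (pvUpd f s p))
            (fun x => -x.2) (fun x => x.1)) none (some (PySem.Int.floordiv n 2))).map
          (fun e => e.1)
        = ((PySem.List.sorted2 (pvPairs (PySem.List.pyRange 1 (n + 1)) (pvUpd f s p))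
              (fun x => -x.2) (fun x => x.1)).take (n.toNat / 2)).map (fun e => e.1) := by
      rw [pv_slice_half n _ hlen2, hlen2]
    -- flag ↔ the new top half is inside the old one
    have hflag : ((((PySem.List.sorted2 (pvPairs (PySem.List.pyRange 1 (n + 1)) (pvUpd f s p))
              (fun x => -x.2) (fun x => x.1)).take (n.toNat / 2)).map (fun e => e.1)).all
            (fun t => (((PySem.List.sorted2 (pvPairs (PySem.List.pyRange 1 (n + 1)) f)
              (fun x => -x.2) (fun x => x.1)).take (n.toNat / 2)).map (fun e => e.1)).contains t)
          = true)
        ↔ (∀ t ∈ PySem.List.pyRange 1 (n + 1),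
            pvRk (PySem.List.pyRange 1 (n + 1)) (pvUpd f s p) t < n.toNat / 2 →
              pvRk (PySem.List.pyRange 1 (n + 1)) f t < n.toNat / 2) := by
      rw [List.all_eq_true]
      constructor
      · intro hall t htl hrk
        have hmem := (pv_top_mem _ hnd (pvUpd f s p) (n.toNat / 2) t).mpr ⟨htl, hrk⟩
        have := hall t hmem
        rw [List.contains_iff_mem] at this
        exact ((pv_top_mem _ hnd f (n.toNat / 2) t).mp this).2
      · intro hsub t htm
        rw [List.contains_iff_mem]
        have := (pv_top_mem _ hnd (pvUpd f s p) (n.toNat / 2) t).mp htm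
        exact (pv_top_mem _ hnd f (n.toNat / 2) t).mpr ⟨this.1, hsub t this.1 this.2⟩
    have hcross := pv_cross (PySem.List.pyRange 1 (n + 1)) hnd f s p hsl (n.toNat / 2)
      (by omega)
    -- B's numbers are the two ranks
    have hmemi : (s, f s) ∈ d.items := by
      rw [hB, pvPairs, List.mem_map]; exact ⟨s, hsl, rfl⟩
    have hold : d.getD s 0 = f s := PySem.Dict.getD_of_mem_items d hmemi hknd 0
    have hi : pvRank d.items (d.getD s 0) s = (pvRk (PySem.List.pyRange 1 (n + 1)) f s : Int) := by
      rw [hold, hB]; exact pv_rank_pairs _ f s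
    have hitems' : (d.insert s (d.getD s 0 + p)).items
        = pvPairs (PySem.List.pyRange 1 (n + 1)) (pvUpd f s p) := by
      rw [hold, PySem.Dict.items_insert_of_contains _ _ hc, hB, pvPairs, pvPairs, List.map_map]
      refine List.map_congr_left (fun i _ => ?_)
      by_cases his : i = s
      · subst his; simp [pvUpd]
      · simp [pvUpd, his]
    have hj : pvRank (d.insert s (d.getD s 0 + p)).items (d.getD s 0 + p) s
        = (pvRk (PySem.List.pyRange 1 (n + 1)) (pvUpd f s p) s : Int) := by
      rw [hitems', hold, show f s + p = pvUpd f s p s from by simp [pvUpd]]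
      exact pv_rank_pairs _ (pvUpd f s p) s
    have hhalf : PySem.Int.floordiv n 2 = ((n.toNat / 2 : Nat) : Int) := by
      rw [show n = ((n.toNat : Nat) : Int) from by omega,
        show ((2 : Int)) = ((2 : Nat) : Int) from rfl, PySem.Int.floordiv_natCast]
      simp
    -- assemble
    refine ⟨pvUpd f s p, ?_, ?_, ?_⟩
    · simp only [pvStepA]
      exact htot2
    · simp only [pvStepB, hc, if_true]
      exact hitems'
    · simp only [pvStepA, pvStepB, pvIsChange, hc, if_true]
      rw [htot2, hnew, hbefore, hi, hj, hhalf, hans]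
      by_cases hP : pvRk (PySem.List.pyRange 1 (n + 1)) f s < n.toNat / 2 <;>
        by_cases hQ : pvRk (PySem.List.pyRange 1 (n + 1)) (pvUpd f s p) s < n.toNat / 2
      · rw [hflag.mpr (hcross.mpr (by tauto))]
        simp only [Bool.not_true, Bool.false_eq_true, if_false]
        simp
        omega
      · have hfl : ¬ _ = true := fun hsub => hQ ((hcross.mp (hflag.mp hsub)).mp hP)
        rw [Bool.not_eq_true] at hfl
        rw [hfl]
        simp
        omega
      · have hfl : ¬ _ = true := fun hsub => hP ((hcross.mp (hflag.mp hsub)).mpr hQ)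
        rw [Bool.not_eq_true] at hfl
        rw [hfl]
        simp
        omega
      · rw [hflag.mpr (hcross.mpr (by tauto))]
        simp only [Bool.not_true, Bool.false_eq_true, if_false]
        simp
        omega
  · -- s is not on the board: nothing changes on either side
    rw [Bool.not_eq_true] at hc
    have hsl : s ∉ PySem.List.pyRange 1 (n + 1) := by
      intro hm
      have htc : d.contains s = true := (PySem.Dict.contains_iff_mem_keys d s).mpr
        (by rw [hkeys]; exact hm)
      rw [hc] at htc
      exact Bool.false_ne_true htc
    have hid : total.map (fun e => if e.1 == s then (e.1, e.2 + p) else e) = total := by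
      have hpt : ∀ e ∈ total, (if e.1 == s then (e.1, e.2 + p) else e) = e := by
        intro e he
        have heP := hpermA.mem_iff.mp he
        rw [pvPairs, List.mem_map] at heP
        obtain ⟨i, hi, hie⟩ := heP
        have hne : e.1 ≠ s := by
          rw [← hie]
          intro heq
          exact hsl (heq ▸ hi)
        simp [hne]
      rw [List.map_congr_left hpt]
      simp
    have htot2 : PySem.List.sorted2 total (fun x => -x.2) (fun x => x.1) = total := by
      rw [pv_sorted2_congr hpermA, ← hA]
    have hlen_tot : total.length = n.toNat := by
      rw [hpermA.length_eq, pvPairs, List.length_map, hlenl]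
    refine ⟨f, ?_, ?_, ?_⟩
    · simp only [pvStepA]
      rw [hid, htot2]
      exact hA
    · simp only [pvStepB, hc, Bool.false_eq_true, if_false]
      exact hB
    · simp only [pvStepA, pvStepB, pvIsChange, hc, Bool.false_eq_true, if_false]
      rw [hid, htot2, pv_slice_half n total hlen_tot]
      have hfl : ((total.take (total.length / 2)).map (fun e => e.1)).all
          (fun x => ((total.take (total.length / 2)).map (fun e => e.1)).contains x) = true := by
        rw [List.all_eq_true]
        intro t ht
        rw [List.contains_iff_mem]
        exact ht
      rw [hfl]
      simpa using hans

lemma pv_init (n : Int) :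
    pvInv n ((PySem.List.pyRange 1 (n + 1)).map (fun i => (i, (0 : Int))), 0)
      ((PySem.List.pyRange 1 (n + 1)).foldl (fun d i => d.insert i (0 : Int)) PySem.Dict.empty, 0) := by
  have hnd : (PySem.List.pyRange 1 (n + 1)).Nodup := pv_nodup_pyRange 1 (n + 1)
  refine ⟨fun _ => 0, ?_, ?_, rfl⟩
  · show (PySem.List.pyRange 1 (n + 1)).map (fun i => (i, (0 : Int)))
      = PySem.List.sorted2 _ _ _
    rw [pv_sorted2_eq_sorted]
    refine (PySem.List.sorted_eq_self_of_pairwise _ _ ?_).symm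
    rw [List.pairwise_map]
    have hpl : (PySem.List.pyRange 1 (n + 1)).Pairwise (· < ·) := by
      rw [PySem.List.pyRange_one]
      exact List.pairwise_lt_range.map _ (fun a b hab => by omega)
    refine hpl.imp (fun {a b} hab => ?_)
    rw [pvKey, pvKey]
    exact le_of_lt (Prod.Lex.lt_iff.mpr (Or.inr ⟨rfl, hab⟩))
  · show (List.foldl (fun d i => d.insert i (0 : Int)) PySem.Dict.empty
        (PySem.List.pyRange 1 (n + 1))).items = _
    have h := PySem.Dict.items_foldl_insert_fresh (l := PySem.List.pyRange 1 (n + 1))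
      (k := fun a => a) (v := fun _ => (0 : Int)) (d := PySem.Dict.empty)
      (by intro a _; simp) (by simpa using hnd)
    simpa [pvPairs] using h

lemma pv_fold (n : Int) (l : List (Int × Int)) (sA : List (Int × Int) × Int)
    (sB : PySem.Dict Int Int × Int) (h : pvInv n sA sB) :
    pvInv n (l.foldl (pvStepA n) sA) (l.foldl (pvStepB (PySem.Int.floordiv n 2)) sB) := by
  induction l generalizing sA sB with
  | nil => exact h
  | cons y t ih => exact ih _ _ (pv_step n sA sB y h)

-- ===== VERDICT (by name: the statement is the Claim_ definition above) =====
theorem solution_spec : Claim_equal_solution := by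
  intro n student point _
  unfold Spec_solution solution solution_alt
  obtain ⟨f, -, -, hans⟩ := pv_fold n (student.zip point) _ _ (pv_init n)
  exact hans
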